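-- pv_equiv track=rewrite | github.com/mebneter-ship-it/legal-research | tools.py | extract_relevant_excerpt
-- ===== SOURCE A (Python) =====
-- def extract_relevant_excerpt(
--     raw_content: str,
--     keywords: list,
--     context_chars: int = 1500
-- ) -> str:
--     """
--     Extract the most relevant section around matched keywords.
--     Instead of sending 50k chars, extract ~2k chars around the best match.
--     """
--     if not raw_content:
--         return ""
--
--     raw_lower = raw_content.lower()
--
--     # Sort keywords by weight (highest first)
--     sorted_kw = sorted(keywords, key=lambda x: x[1], reverse=True)
--
--     # Find position of highest-weight keyword that exists
--     best_pos = -1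
--
--     for keyword, weight in sorted_kw:
--         pos = raw_lower.find(keyword.lower())
--         if pos != -1:
--             best_pos = pos
--             break
--
--     if best_pos == -1:
--         return raw_content[:context_chars]
--
--     # Extract context around the keyword
--     start = max(0, best_pos - 200)
--     end = min(len(raw_content), best_pos + context_chars)
--
--     excerpt = raw_content[start:end]
--
--     # Clean up: don't cut mid-word
--     if start > 0:
--         first_space = excerpt.find(' ')
--         if first_space > 0 and first_space < 50:
--             excerpt = excerpt[first_space+1:]
--
--     return f"...{excerpt}..."
-- ===== SOURCE B (Python) =====
-- def extract_relevant_excerpt(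
--     raw_content: str,
--     keywords: list,
--     context_chars: int = 1500
-- ) -> str:
--     """Decompose into two helpers: one unsorted max-weight scan over the
--     keywords (no sort), then window formatting using str.partition instead
--     of find+slice for the mid-word trim."""
--     if not raw_content:
--         return ""
--     best_pos = _best_match_pos(raw_content.lower(), keywords)
--     if best_pos == -1:
--         return raw_content[:context_chars]
--     return _format_window(raw_content, best_pos, context_chars)
--
--
-- def _best_match_pos(raw_lower, keywords):
--     """Position of the found keyword of highest weight (ties: earliest in list)."""
--     best_pos = -1
--     best_weight = None
--     for keyword, weight in keywords:
--         pos = raw_lower.find(keyword.lower())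
--         if pos != -1 and (best_weight is None or weight > best_weight):
--             best_weight = weight
--             best_pos = pos
--     return best_pos
--
--
-- def _format_window(raw_content, best_pos, context_chars):
--     start = max(0, best_pos - 200)
--     end = min(len(raw_content), best_pos + context_chars)
--     excerpt = raw_content[start:end]
--     if start > 0:
--         head, sep, rest = excerpt.partition(' ')
--         if sep and 0 < len(head) < 50:
--             excerpt = rest
--     return f"...{excerpt}..."
-- ===== Notes on version B (the rewrite author's own statement) =====
-- stated objective: simpler
-- what changed: Replaced A's sort-by-weight-then-break-on-first-hit with an unsorted single pass keeping the found keyword of highest weight (ties: earliest in list), and replaced the find+conditional-reslice mid-word trim with str.partition on the first space; the logic is split into two small helpers.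
import Mathlib
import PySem

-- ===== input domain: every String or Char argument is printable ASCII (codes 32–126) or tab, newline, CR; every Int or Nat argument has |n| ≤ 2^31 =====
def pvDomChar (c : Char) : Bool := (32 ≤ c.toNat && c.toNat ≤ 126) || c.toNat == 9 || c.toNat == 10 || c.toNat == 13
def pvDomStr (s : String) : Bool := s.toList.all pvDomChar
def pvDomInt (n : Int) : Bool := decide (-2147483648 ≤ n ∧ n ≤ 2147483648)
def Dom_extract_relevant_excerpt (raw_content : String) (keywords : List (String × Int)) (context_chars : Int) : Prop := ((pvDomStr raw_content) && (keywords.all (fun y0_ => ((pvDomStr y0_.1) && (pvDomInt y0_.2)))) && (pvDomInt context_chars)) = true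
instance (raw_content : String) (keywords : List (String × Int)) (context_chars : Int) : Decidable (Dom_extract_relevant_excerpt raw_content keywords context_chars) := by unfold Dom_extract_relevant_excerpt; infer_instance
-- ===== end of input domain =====

-- B replaces A's sort-then-break-on-first-hit by an unsorted max-weight scan and
-- the find+reslice mid-word trim by a partition on the first space; objective: simpler.

-- ===== PORT A =====
-- A's for-loop with break: first keyword found in the (stably weight-descending) sorted list
def pvFirstFound (raw_lower : String) : List (String × Int) → Int
  | [] => -1
  | kw :: rest =>
    let pos := PySem.Str.find raw_lower (PySem.Str.lower kw.1)
    if pos ≠ -1 then pos else pvFirstFound raw_lower rest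

def extract_relevant_excerpt (raw_content : String) (keywords : List (String × Int)) (context_chars : Int) : String :=
  if raw_content = "" then "" else
  let raw_lower := PySem.Str.lower raw_content
  let sorted_kw := PySem.List.sorted keywords (fun x => x.2) true
  let best_pos := pvFirstFound raw_lower sorted_kw
  if best_pos = -1 then PySem.Str.slice raw_content none (some context_chars)
  else
    let start := max 0 (best_pos - 200)
    let end_ := min (PySem.Str.len raw_content) (best_pos + context_chars)
    let excerpt := PySem.Str.slice raw_content (some start) (some end_)
    let excerpt :=
      if start > 0 then
        let first_space := PySem.Str.find excerpt " "
        if first_space > 0 ∧ first_space < 50 then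
          PySem.Str.slice excerpt (some (first_space + 1)) none
        else excerpt
      else excerpt
    "..." ++ excerpt ++ "..."

-- ===== PORT B =====
-- Source B's _best_match_pos loop: state = (best_pos, best_weight); replace on strictly larger weight
def pvScanStep (raw_lower : String) (st : Option Int × Int) (kw : String × Int) : Option Int × Int :=
  let pos := PySem.Str.find raw_lower (PySem.Str.lower kw.1)
  if pos != -1 && (match st.1 with | none => true | some bw => decide (bw < kw.2)) then
    (some kw.2, pos)
  else st

def pvBestMatchPos (raw_lower : String) (keywords : List (String × Int)) : Int :=
  (keywords.foldl (pvScanStep raw_lower) (none, -1)).2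

-- excerpt.partition(' ') on code points: (head, separator-found?, rest)
def pvPartitionSpace : List Char → List Char × Bool × List Char
  | [] => ([], false, [])
  | c :: rest =>
    if c = ' ' then ([], true, rest)
    else
      let (h, s, t) := pvPartitionSpace rest
      (c :: h, s, t)

def pvFormatWindow (raw_content : String) (best_pos : Int) (context_chars : Int) : String :=
  let start := max 0 (best_pos - 200)
  let end_ := min (PySem.Str.len raw_content) (best_pos + context_chars)
  let excerpt := PySem.Str.slice raw_content (some start) (some end_)
  let excerpt :=
    if start > 0 then
      let p := pvPartitionSpace excerpt.toList
      if p.2.1 && decide (0 < p.1.length) && decide (p.1.length < 50) then String.ofList p.2.2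
      else excerpt
    else excerpt
  "..." ++ excerpt ++ "..."

def extract_relevant_excerpt_alt (raw_content : String) (keywords : List (String × Int)) (context_chars : Int) : String :=
  if raw_content = "" then "" else
  let best_pos := pvBestMatchPos (PySem.Str.lower raw_content) keywords
  if best_pos = -1 then PySem.Str.slice raw_content none (some context_chars)
  else pvFormatWindow raw_content best_pos context_chars

-- ===== PRECONDITION & SPEC =====
def Spec_extract_relevant_excerpt (raw_content : String) (keywords : List (String × Int)) (context_chars : Int) (out : String) : Prop := out = extract_relevant_excerpt_alt raw_content keywords context_chars
instance (raw_content : String) (keywords : List (String × Int)) (context_chars : Int) (out : String) : Decidable (Spec_extract_relevant_excerpt raw_content keywords context_chars out) := by unfold Spec_extract_relevant_excerpt; infer_instance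

-- ===== CLAIM (what is proved, stated in full; the proofs are below) =====
def Claim_equal_extract_relevant_excerpt : Prop := ∀ (raw_content : String) (keywords : List (String × Int)) (context_chars : Int), Dom_extract_relevant_excerpt raw_content keywords context_chars → Spec_extract_relevant_excerpt raw_content keywords context_chars (extract_relevant_excerpt raw_content keywords context_chars)

-- ===== LEMMAS AND PROOFS =====

-- A's scan, but remembering the chosen keyword's weight as well as its position
def pvPick (raw_lower : String) : List (String × Int) → Option (Int × Int)
  | [] => none
  | kw :: rest =>
    let pos := PySem.Str.find raw_lower (PySem.Str.lower kw.1)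
    if pos ≠ -1 then some (kw.2, pos) else pvPick raw_lower rest

-- pack pvPick's result as B's loop state
def pvEnc : Option (Int × Int) → Option Int × Int
  | none => (none, -1)
  | some wp => (some wp.1, wp.2)

theorem pvFirstFound_eq_pick (rl : String) (L : List (String × Int)) :
    pvFirstFound rl L = (pvEnc (pvPick rl L)).2 := by
  induction L with
  | nil => rfl
  | cons kw rest ih =>
    simp only [pvFirstFound, pvPick]
    split_ifs with h
    · rfl
    · simpa using ih

theorem pvPick_weight_mem (rl : String) (L : List (String × Int)) (w p : Int)
    (h : pvPick rl L = some (w, p)) : ∃ e ∈ L, e.2 = w := by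
  induction L with
  | nil => simp [pvPick] at h
  | cons kw rest ih =>
    simp only [pvPick] at h
    split_ifs at h with hf
    · injection h with h'
      exact ⟨kw, by simp, congrArg Prod.fst h'⟩
    · obtain ⟨e, he, hw⟩ := ih h
      exact ⟨e, List.mem_cons_of_mem _ he, hw⟩

theorem pvPick_insertBy (rl : String) (x : String × Int) (L : List (String × Int))
    (hL : L.Pairwise (fun a b => b.2 ≤ a.2)) :
    pvEnc (pvPick rl (PySem.List.insertBy (fun a b => decide (b.2 < a.2)) x L))
      = pvScanStep rl (pvEnc (pvPick rl L)) x := by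
  induction L with
  | nil =>
    by_cases hfx : PySem.Chars.find rl.toList (PySem.Chars.lower x.1.toList) = -1
    · simp [PySem.List.insertBy, pvPick, pvScanStep, pvEnc, hfx]
    · simp [PySem.List.insertBy, pvPick, pvScanStep, pvEnc, hfx]
  | cons y ys ih =>
    have hys : ys.Pairwise (fun a b => b.2 ≤ a.2) := hL.tail
    have hhead : ∀ e ∈ ys, e.2 ≤ y.2 := fun e he => (List.pairwise_cons.mp hL).1 e he
    by_cases hcmp : y.2 < x.2
    · -- x is inserted in front: the list is x :: y :: ys
      have hins : PySem.List.insertBy (fun a b => decide (b.2 < a.2)) x (y :: ys) = x :: y :: ys := by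
        simp [PySem.List.insertBy, hcmp]
      rw [hins]
      by_cases hfx : PySem.Chars.find rl.toList (PySem.Chars.lower x.1.toList) = -1
      · -- x not found: skip x on both sides
        rw [show pvPick rl (x :: y :: ys) = pvPick rl (y :: ys) by simp [pvPick, hfx]]
        simp [pvScanStep, hfx]
      · -- x found: both sides pick x (any earlier pick has strictly smaller weight)
        rw [show pvPick rl (x :: y :: ys)
              = some (x.2, PySem.Str.find rl (PySem.Str.lower x.1)) by simp [pvPick, hfx]]
        rcases hP : pvPick rl (y :: ys) with _ | ⟨w, p⟩
        · simp [pvScanStep, pvEnc, hfx]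
        · obtain ⟨e, he, hw⟩ := pvPick_weight_mem rl _ _ _ hP
          have hwle : w ≤ y.2 := by
            rcases List.mem_cons.mp he with he | he
            · exact hw ▸ he ▸ le_refl _
            · exact hw ▸ hhead e he
          have hwlt : w < x.2 := lt_of_le_of_lt hwle hcmp
          simp [pvScanStep, pvEnc, hfx, hwlt]
    · -- x goes behind y: the list is y :: insertBy x ys
      have hins : PySem.List.insertBy (fun a b => decide (b.2 < a.2)) x (y :: ys)
          = y :: PySem.List.insertBy (fun a b => decide (b.2 < a.2)) x ys := by
        simp [PySem.List.insertBy, hcmp]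
      rw [hins]
      by_cases hfy : PySem.Chars.find rl.toList (PySem.Chars.lower y.1.toList) = -1
      · -- y not found: skip y on both sides, then apply the induction hypothesis
        rw [show pvPick rl (y :: PySem.List.insertBy (fun a b => decide (b.2 < a.2)) x ys)
              = pvPick rl (PySem.List.insertBy (fun a b => decide (b.2 < a.2)) x ys) by
            simp [pvPick, hfy]]
        rw [show pvPick rl (y :: ys) = pvPick rl ys by simp [pvPick, hfy]]
        exact ih hys
      · -- y found: both sides keep y (x's weight is not strictly larger)
        simp [pvPick, pvScanStep, pvEnc, hfy, hcmp]

theorem pvBestMatchPos_eq_sorted_scan (rl : String) (kws : List (String × Int)) :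
    pvBestMatchPos rl kws = pvFirstFound rl (PySem.List.sorted kws (fun x => x.2) true) := by
  rw [pvFirstFound_eq_pick]
  unfold pvBestMatchPos
  suffices h : kws.foldl (pvScanStep rl) (none, -1)
      = pvEnc (pvPick rl (PySem.List.sorted kws (fun x => x.2) true)) by rw [h]
  induction kws using List.reverseRecOn with
  | nil => simp [PySem.List.sorted_rev_eq_foldl_insertBy, pvPick, pvEnc]
  | append_singleton xs x ih =>
    have hsort : PySem.List.sorted (xs ++ [x]) (fun x => x.2) true
        = PySem.List.insertBy (fun a b => decide (b.2 < a.2)) x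
            (PySem.List.sorted xs (fun x => x.2) true) := by
      rw [PySem.List.sorted_rev_eq_foldl_insertBy, PySem.List.sorted_rev_eq_foldl_insertBy,
          List.foldl_append, List.foldl_cons, List.foldl_nil]
    rw [List.foldl_append, List.foldl_cons, List.foldl_nil, ih, hsort]
    exact (pvPick_insertBy rl x _ (PySem.List.sorted_pairwise_rev xs (fun x => x.2))).symm

-- partition characterisation
theorem pvPartitionSpace_false (l : List Char) (h : (pvPartitionSpace l).2.1 = false) :
    ' ' ∉ l := by
  induction l with
  | nil => simp
  | cons c rest ih =>
    by_cases hc : c = ' '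
    · simp [pvPartitionSpace, hc] at h
    · simp only [pvPartitionSpace, if_neg hc] at h
      simp only [List.mem_cons]
      rintro (rfl | hm)
      · exact hc rfl
      · exact ih h hm

theorem pvPartitionSpace_true (l : List Char) (h : (pvPartitionSpace l).2.1 = true) :
    l = (pvPartitionSpace l).1 ++ ' ' :: (pvPartitionSpace l).2.2
      ∧ ' ' ∉ (pvPartitionSpace l).1 := by
  induction l with
  | nil => simp [pvPartitionSpace] at h
  | cons c rest ih =>
    by_cases hc : c = ' '
    · subst hc; simp [pvPartitionSpace]
    · simp only [pvPartitionSpace, if_neg hc] at h ⊢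
      obtain ⟨h1, h2⟩ := ih h
      refine ⟨by simpa using congrArg (c :: ·) h1, ?_⟩
      simp only [List.mem_cons]
      rintro (rfl | hm)
      · exact hc rfl
      · exact h2 hm

-- find of the first space equals the partition head's length
theorem pvFind_space_eq (h t : List Char) (hh : ' ' ∉ h) :
    PySem.Chars.find (h ++ ' ' :: t) [' '] = (h.length : Int) := by
  set l := h ++ ' ' :: t with hl
  have hinf : [' '] <:+: l := ⟨h, t, by simp [hl]⟩
  have hnn : 0 ≤ PySem.Chars.find l [' '] := (PySem.Chars.find_nonneg_iff l [' ']).mpr hinf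
  obtain ⟨hocc, hmin⟩ := PySem.Chars.find_spec hnn
  have hoccH : [' '] <+: l.drop h.length := by
    rw [hl, List.drop_append_of_le_length (le_refl _)]
    simp
  have hle : (PySem.Chars.find l [' ']).toNat ≤ h.length := by
    by_contra hgt
    exact (hmin h.length (by omega)) hoccH
  have hge : ¬ (PySem.Chars.find l [' ']).toNat < h.length := by
    intro hlt
    obtain ⟨s, hs⟩ := hocc
    have hhead : l[(PySem.Chars.find l [' ']).toNat]? = some ' ' := by
      have := congrArg List.head? hs
      rw [List.head?_append_of_ne_nil _ (by simp), List.head?_drop] at this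
      exact this.symm
    have hmem : ' ' ∈ h := by
      rw [hl, List.getElem?_append_left hlt] at hhead
      exact List.mem_of_getElem? hhead
    exact hh hmem
  omega

-- the trim step: A's find+slice equals B's partition
theorem pvTrim_eq (e : String) :
    (let first_space := PySem.Str.find e " ";
     if first_space > 0 ∧ first_space < 50 then
       PySem.Str.slice e (some (first_space + 1)) none
     else e)
    = (let p := pvPartitionSpace e.toList;
       if p.2.1 && decide (0 < p.1.length) && decide (p.1.length < 50) then String.ofList p.2.2
       else e) := by
  have hfind : PySem.Str.find e " " = PySem.Chars.find e.toList [' '] := by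
    simp [PySem.Str.find_eq]
  rcases hP : pvPartitionSpace e.toList with ⟨h, sep, t⟩
  cases sep with
  | false =>
    have hnm := pvPartitionSpace_false e.toList (by rw [hP])
    have hninf : ¬ [' '] <:+: e.toList := fun hinf => hnm (hinf.subset (by simp))
    have hneg : PySem.Chars.find e.toList [' '] = -1 :=
      (PySem.Chars.find_eq_neg_one_iff _ _).mpr hninf
    simp [hneg]
  | true =>
    obtain ⟨hdec, hnm⟩ := pvPartitionSpace_true e.toList (by rw [hP])
    rw [hP] at hdec hnm
    have hfl : PySem.Chars.find e.toList [' '] = (h.length : Int) := by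
      rw [hdec]; exact pvFind_space_eq h t hnm
    rw [hfind, hfl]
    by_cases hcond : 0 < h.length ∧ h.length < 50
    · rw [if_pos (by exact_mod_cast hcond), if_pos (by simp [hcond.1, hcond.2])]
      have htl : (PySem.Str.slice e (some ((h.length : Int) + 1)) none).toList = t := by
        rw [PySem.Str.toList_slice]
        have hc : ((h.length : Int) + 1) = ((h.length + 1 : Nat) : Int) := by push_cast; ring
        rw [hc]
        simp only [PySem.Chars.slice_eq_listSlice, PySem.List.slice_from_natCast]
        rw [hdec]
        simp
      have := congrArg String.ofList htl
      simpa using this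
    · have hA : ¬ ((h.length : Int) > 0 ∧ (h.length : Int) < 50) := by
        intro hc
        exact hcond ⟨by exact_mod_cast hc.1, by exact_mod_cast hc.2⟩
      rw [if_neg hA, if_neg (by simpa using hcond)]

-- ===== VERDICT (by name: the statement is the Claim_ definition above) =====
theorem extract_relevant_excerpt_spec : Claim_equal_extract_relevant_excerpt := by
  intro raw_content keywords context_chars _
  unfold Spec_extract_relevant_excerpt
  simp only [extract_relevant_excerpt, extract_relevant_excerpt_alt, pvFormatWindow,
    pvBestMatchPos_eq_sorted_scan]
  by_cases h0 : raw_content = ""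
  · rw [if_pos h0, if_pos h0]
  · rw [if_neg h0, if_neg h0]
    by_cases hb : pvFirstFound (PySem.Str.lower raw_content)
        (PySem.List.sorted keywords (fun x => x.2) true) = -1
    · rw [if_pos hb, if_pos hb]
    · rw [if_neg hb, if_neg hb]
      by_cases hst : max 0 (pvFirstFound (PySem.Str.lower raw_content)
          (PySem.List.sorted keywords (fun x => x.2) true) - 200) > 0
      · rw [if_pos hst, if_pos hst]
        exact congrArg (fun s => "..." ++ s ++ "...") (pvTrim_eq _)
      · rw [if_neg hst, if_neg hst]
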